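-- pv_equiv track=rewrite | github.com/gr8Adakron/Overlap-Add-Method-in-Python-DSP- | overlap.py | returnx
-- ===== SOURCE A (Python) =====
-- def returnx(l,p,n,mat1):
--     x=[[0 for row in range(0,int(n))] for col in range(0,int(p))]
--     z=int(0)
--     lenmat1=len(mat1)
--     for row in range(0,p-1):
--         value=0
--         for col in range(0,n):
--             if(value<l):
--                 if(z<lenmat1):
--                     x[row][col]=mat1[z]
--                     value=value+1
--                     z=z+1
--                 else:
--                     x[row][col]=0
--     return x
-- ===== SOURCE B (Python) =====
-- def returnx(l, p, n, mat1):
--     # Build each data row as one slice of mat1, padded with zeros; the last row stays zero.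
--     w = max(int(n), 0)
--     rows = []
--     z = 0
--     for i in range(int(p)):
--         if i == int(p) - 1:
--             rows.append([0] * w)
--         else:
--             k = max(0, min(l, n, len(mat1) - z))
--             rows.append(mat1[z:z + k] + [0] * (w - k))
--             z += k
--     return rows
-- ===== Notes on version B (the rewrite author's own statement) =====
-- stated objective: simpler
-- what changed: Replaces A's preallocated p×n matrix mutated by a per-cell inner loop with a value counter by a single pass that keeps one pointer z and emits each data row as one slice mat1[z:z+k]+[0]*(w-k) with k=max(0,min(l,n,len(mat1)-z)) (last row a fresh zero row).
import Mathlib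
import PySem

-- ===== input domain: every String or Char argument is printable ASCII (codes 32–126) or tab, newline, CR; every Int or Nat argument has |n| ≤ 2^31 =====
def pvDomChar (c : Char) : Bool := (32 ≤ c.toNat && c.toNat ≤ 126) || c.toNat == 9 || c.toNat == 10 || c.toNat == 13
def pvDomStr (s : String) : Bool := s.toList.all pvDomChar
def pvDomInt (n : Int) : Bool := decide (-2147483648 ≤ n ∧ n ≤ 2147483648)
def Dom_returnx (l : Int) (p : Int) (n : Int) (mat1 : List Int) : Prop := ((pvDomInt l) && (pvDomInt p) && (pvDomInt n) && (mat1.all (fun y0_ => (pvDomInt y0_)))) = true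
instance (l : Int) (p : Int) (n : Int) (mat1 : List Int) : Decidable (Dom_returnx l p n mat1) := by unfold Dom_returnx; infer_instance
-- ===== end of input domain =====

-- B builds each data row with one slice of mat1 plus zero padding driven by a pointer,
-- instead of A's cell-by-cell mutation of a preallocated matrix (objective: simpler).

-- ===== PORT A =====
-- x[row][col] = v: both indices come from range(0,·) here, so they are nonnegative and
-- in range, and List.set on the toNat indices is exact for this Python assignment.
def pvSetMat (x : List (List Int)) (row col : Int) (v : Int) : List (List Int) :=
  x.set row.toNat ((x.getD row.toNat []).set col.toNat v)

-- body of A's inner 'for col' loop (state: the matrix x, value, z)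
def pvInnerStep (l : Int) (mat1 : List Int) (lenmat1 : Int) (row : Int)
    (st2 : List (List Int) × Int × Int) (col : Int) : List (List Int) × Int × Int :=
  let x := st2.1
  let value := st2.2.1
  let z := st2.2.2
  if value < l then
    if z < lenmat1 then
      -- mat1[z]: on this branch 0 ≤ z < len mat1, so getD is exact
      (pvSetMat x row col (PySem.List.pyGetD mat1 z 0), value + 1, z + 1)
    else
      (pvSetMat x row col 0, value, z)
  else st2

-- body of A's outer 'for row' loop (state: the matrix x and z; value resets to 0)
def pvOuterStep (l n : Int) (mat1 : List Int) (lenmat1 : Int)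
    (st : List (List Int) × Int) (row : Int) : List (List Int) × Int :=
  let inner := (PySem.List.pyRange 0 n 1).foldl (pvInnerStep l mat1 lenmat1 row) (st.1, 0, st.2)
  (inner.1, inner.2.2)

def returnx (l : Int) (p : Int) (n : Int) (mat1 : List Int) : List (List Int) :=
  let x0 : List (List Int) :=
    (PySem.List.pyRange 0 p 1).map (fun _ => (PySem.List.pyRange 0 n 1).map (fun _ => (0 : Int)))
  let lenmat1 : Int := mat1.length
  ((PySem.List.pyRange 0 (p - 1) 1).foldl (pvOuterStep l n mat1 lenmat1) (x0, 0)).1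

-- ===== PORT B =====
-- body of B's single 'for i' loop (state: the rows built so far and the pointer z)
def pvAltStep (l p n : Int) (mat1 : List Int) (w : Int)
    (st : List (List Int) × Int) (i : Int) : List (List Int) × Int :=
  let rows := st.1
  let z := st.2
  if i = p - 1 then
    (rows ++ [List.replicate w.toNat 0], z)
  else
    let k : Int := max 0 (min l (min n ((mat1.length : Int) - z)))
    (rows ++ [PySem.List.slice mat1 (some z) (some (z + k)) ++ List.replicate (w - k).toNat 0], z + k)

def returnx_alt (l : Int) (p : Int) (n : Int) (mat1 : List Int) : List (List Int) :=
  let w : Int := max n 0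
  ((PySem.List.pyRange 0 p 1).foldl (pvAltStep l p n mat1 w) ([], 0)).1

-- ===== PRECONDITION & SPEC =====
def Spec_returnx (l : Int) (p : Int) (n : Int) (mat1 : List Int) (out : List (List Int)) : Prop := out = returnx_alt l p n mat1
instance (l : Int) (p : Int) (n : Int) (mat1 : List Int) (out : List (List Int)) : Decidable (Spec_returnx l p n mat1 out) := by unfold Spec_returnx; infer_instance

-- ===== CLAIM (what is proved, stated in full; the proofs are below) =====
def Claim_equal_returnx : Prop := ∀ (l : Int) (p : Int) (n : Int) (mat1 : List Int), Dom_returnx l p n mat1 → Spec_returnx l p n mat1 (returnx l p n mat1)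

-- ===== LEMMAS AND PROOFS =====

-- the contents A's inner loop writes into one row, starting with counter v and pointer z
def pvChunkF (l : Int) (mat1 : List Int) (v z : Int) : Nat → List Int
  | 0 => []
  | cnt + 1 =>
    if v < l ∧ z < (mat1.length : Int) then
      PySem.List.pyGetD mat1 z 0 :: pvChunkF l mat1 (v + 1) (z + 1) cnt
    else
      0 :: pvChunkF l mat1 v z cnt

def pvVF (l : Int) (mat1 : List Int) (v z : Int) : Nat → Int
  | 0 => v
  | cnt + 1 =>
    if v < l ∧ z < (mat1.length : Int) then pvVF l mat1 (v + 1) (z + 1) cnt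
    else pvVF l mat1 v z cnt

def pvZF (l : Int) (mat1 : List Int) (v z : Int) : Nat → Int
  | 0 => z
  | cnt + 1 =>
    if v < l ∧ z < (mat1.length : Int) then pvZF l mat1 (v + 1) (z + 1) cnt
    else pvZF l mat1 v z cnt

-- the rows produced by m data-row iterations, starting at pointer z
def pvChunks (l n : Int) (mat1 : List Int) : Int → Nat → List (List Int)
  | _, 0 => []
  | z, m + 1 => pvChunkF l mat1 0 z n.toNat :: pvChunks l n mat1 (pvZF l mat1 0 z n.toNat) m

def pvZEnd (l n : Int) (mat1 : List Int) : Int → Nat → Int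
  | z, 0 => z
  | z, m + 1 => pvZEnd l n mat1 (pvZF l mat1 0 z n.toNat) m

lemma pvSetMat_at (rows rest : List (List Int)) (row0 : List Int) (c : Int) (v : Int) :
    pvSetMat (rows ++ row0 :: rest) (rows.length : Int) c v
      = rows ++ (row0.set c.toNat v) :: rest := by
  unfold pvSetMat
  rw [Int.toNat_natCast]
  rw [List.getD_eq_getElem?_getD, List.getElem?_append_right (le_refl _)]
  simp

lemma pv_inner (l n : Int) (mat1 : List Int) :
    ∀ (cnt : Nat) (c v z : Int) (rows rest : List (List Int)) (done : List Int),
      (n - c).toNat = cnt → 0 ≤ c → done.length = c.toNat →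
      (PySem.List.pyRange c n 1).foldl (pvInnerStep l mat1 mat1.length (rows.length : Int))
          (rows ++ (done ++ List.replicate cnt 0) :: rest, v, z)
        = (rows ++ (done ++ pvChunkF l mat1 v z cnt) :: rest,
            pvVF l mat1 v z cnt, pvZF l mat1 v z cnt) := by
  intro cnt
  induction cnt with
  | zero =>
    intro c v z rows rest done hcnt hc hd
    rw [PySem.List.pyRange_one_eq_nil (by omega)]
    simp [pvChunkF, pvVF, pvZF]
  | succ cnt ih =>
    intro c v z rows rest done hcnt hc hd
    rw [PySem.List.pyRange_one_cons (by omega)]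
    rw [List.foldl_cons]
    show (PySem.List.pyRange (c+1) n 1).foldl _ (pvInnerStep l mat1 mat1.length (rows.length : Int) _ c) = _
    by_cases hv : v < l
    · by_cases hz : z < (mat1.length : Int)
      · have hstep : pvInnerStep l mat1 mat1.length (rows.length : Int)
            (rows ++ (done ++ List.replicate (cnt+1) 0) :: rest, v, z) c
            = (rows ++ ((done ++ [PySem.List.pyGetD mat1 z 0]) ++ List.replicate cnt 0) :: rest, v + 1, z + 1) := by
          simp only [pvInnerStep, if_pos hv, if_pos hz, pvSetMat_at]
          rw [List.replicate_succ, ← hd]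
          simp
        rw [hstep, ih (c+1) (v+1) (z+1) rows rest _ (by omega) (by omega) (by simp [hd]; omega)]
        simp only [pvChunkF, pvVF, pvZF, if_pos (And.intro hv hz)]
        simp
      · have hstep : pvInnerStep l mat1 mat1.length (rows.length : Int)
            (rows ++ (done ++ List.replicate (cnt+1) 0) :: rest, v, z) c
            = (rows ++ ((done ++ [(0:Int)]) ++ List.replicate cnt 0) :: rest, v, z) := by
          simp only [pvInnerStep, if_pos hv, if_neg hz, pvSetMat_at]
          rw [List.replicate_succ, ← hd]
          simp
        rw [hstep, ih (c+1) v z rows rest _ (by omega) (by omega) (by simp [hd]; omega)]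
        have hcond : ¬ (v < l ∧ z < (mat1.length : Int)) := by tauto
        simp only [pvChunkF, pvVF, pvZF, if_neg hcond]
        simp
    · have hstep : pvInnerStep l mat1 mat1.length (rows.length : Int)
          (rows ++ (done ++ List.replicate (cnt+1) 0) :: rest, v, z) c
          = (rows ++ ((done ++ [(0:Int)]) ++ List.replicate cnt 0) :: rest, v, z) := by
        simp only [pvInnerStep, if_neg hv]
        rw [List.replicate_succ, List.append_cons done (0:Int)]
      rw [hstep, ih (c+1) v z rows rest _ (by omega) (by omega) (by simp [hd]; omega)]
      have hcond : ¬ (v < l ∧ z < (mat1.length : Int)) := by tauto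
      simp only [pvChunkF, pvVF, pvZF, if_neg hcond]
      simp


lemma pv_outerA (l p n : Int) (mat1 : List Int) :
    ∀ (m t : Nat) (z : Int) (rows : List (List Int)),
      (rows.length : Int) = p - 1 - m → m ≤ t →
      (PySem.List.pyRange (p - 1 - m) (p - 1) 1).foldl (pvOuterStep l n mat1 mat1.length)
          (rows ++ List.replicate t (List.replicate n.toNat 0), z)
        = (rows ++ pvChunks l n mat1 z m ++ List.replicate (t - m) (List.replicate n.toNat 0),
            pvZEnd l n mat1 z m) := by
  intro m
  induction m with
  | zero =>
    intro t z rows hlen ht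
    rw [show p - 1 - (0:Nat) = p - 1 by omega, PySem.List.pyRange_one_eq_nil (le_refl _)]
    simp [pvChunks, pvZEnd]
  | succ m ih =>
    intro t z rows hlen ht
    have hc : p - 1 - ((m:Nat)+1:Nat) < p - 1 := by omega
    rw [PySem.List.pyRange_one_cons (by push_cast; omega)]
    rw [List.foldl_cons]
    obtain ⟨t', rfl⟩ : ∃ t', t = t' + 1 := ⟨t - 1, by omega⟩
    have hrepl : List.replicate (t'+1) (List.replicate n.toNat (0:Int))
        = ([] ++ List.replicate n.toNat (0:Int)) :: List.replicate t' (List.replicate n.toNat 0) := by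
      simp [List.replicate_succ]
    have hstep : pvOuterStep l n mat1 mat1.length
        (rows ++ List.replicate (t'+1) (List.replicate n.toNat 0), z) (p - 1 - ((m:Nat)+1:Nat))
        = (rows ++ (pvChunkF l mat1 0 z n.toNat) :: List.replicate t' (List.replicate n.toNat 0),
            pvZF l mat1 0 z n.toNat) := by
      simp only [pvOuterStep, hrepl]
      rw [show ((p:Int) - 1 - ((m:Nat)+1:Nat)) = (rows.length : Int) by push_cast at hlen ⊢; omega]
      rw [pv_inner l n mat1 n.toNat 0 0 z rows _ [] (by omega) (le_refl _) (by simp)]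
      simp
    rw [hstep]
    rw [List.append_cons rows]
    have := ih t' (pvZF l mat1 0 z n.toNat) (rows ++ [pvChunkF l mat1 0 z n.toNat])
      (by push_cast at hlen ⊢; simp; omega) (by omega)
    rw [show (p:Int) - 1 - ((m:Nat)+1:Nat) + 1 = p - 1 - (m:Nat) by push_cast; omega]
    rw [this]
    simp [pvChunks, pvZEnd]

lemma pv_chunkFzF (l : Int) (mat1 : List Int) :
    ∀ (cnt : Nat) (v z : Int), 0 ≤ z → z ≤ (mat1.length : Int) →
      pvChunkF l mat1 v z cnt
          = (mat1.drop z.toNat).take (max 0 (min (l - v) (min (cnt : Int) (mat1.length - z)))).toNat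
            ++ List.replicate (cnt - (max 0 (min (l - v) (min (cnt : Int) (mat1.length - z)))).toNat) 0
        ∧ pvZF l mat1 v z cnt = z + max 0 (min (l - v) (min (cnt : Int) (mat1.length - z))) := by
  intro cnt
  induction cnt with
  | zero =>
    intro v z hz0 hzlen
    simp [pvChunkF, pvZF]
  | succ cnt ih =>
    intro v z hz0 hzlen
    by_cases hcond : v < l ∧ z < (mat1.length : Int)
    · have hrec := ih (v + 1) (z + 1) (by omega) (by omega)
      set K' : Int := max 0 (min (l - (v+1)) (min ((cnt:Nat) : Int) (mat1.length - (z+1)))) with hK'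
      have hKval : max 0 (min (l - v) (min (((cnt:Nat)+1 : Nat) : Int) (mat1.length - z))) = K' + 1 := by
        push_cast at hK' ⊢; omega
      have hK'0 : 0 ≤ K' := le_max_left _ _
      constructor
      · rw [show pvChunkF l mat1 v z (cnt+1)
            = PySem.List.pyGetD mat1 z 0 :: pvChunkF l mat1 (v+1) (z+1) cnt by
          simp [pvChunkF, hcond]]
        rw [hrec.1, hKval]
        have hzlt : z.toNat < mat1.length := by omega
        rw [PySem.List.pyGetD_eq_getElem mat1 0 hz0 hcond.2]
        rw [List.drop_eq_getElem_cons hzlt]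
        have h1 : (K' + 1).toNat = K'.toNat + 1 := by omega
        have h2 : (z + 1).toNat = z.toNat + 1 := by omega
        rw [h1, h2, List.take_succ_cons]
        have h3 : cnt + 1 - (K'.toNat + 1) = cnt - K'.toNat := by omega
        rw [h3]
        simp
      · rw [show pvZF l mat1 v z (cnt+1) = pvZF l mat1 (v+1) (z+1) cnt by
          simp [pvZF, hcond]]
        rw [hrec.2, hKval]; ring
    · have hrec := ih v z hz0 hzlen
      have hK0 : max 0 (min (l - v) (min (((cnt:Nat)+1 : Nat) : Int) (mat1.length - z))) = 0 := by
        push_cast; omega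
      have hKc : max 0 (min (l - v) (min ((cnt:Nat) : Int) (mat1.length - z))) = 0 := by
        push_cast at hK0 ⊢; omega
      constructor
      · rw [show pvChunkF l mat1 v z (cnt+1) = 0 :: pvChunkF l mat1 v z cnt by
          simp [pvChunkF, hcond]]
        rw [hrec.1, hKc, hK0]
        simp [List.replicate_succ]
      · rw [show pvZF l mat1 v z (cnt+1) = pvZF l mat1 v z cnt by simp [pvZF, hcond]]
        rw [hrec.2, hKc, hK0]

lemma pv_outerB (l p n : Int) (mat1 : List Int) :
    ∀ (m : Nat) (z : Int) (rows : List (List Int)),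
      0 ≤ p - 1 - m → 0 ≤ z → z ≤ (mat1.length : Int) →
      (PySem.List.pyRange (p - 1 - m) p 1).foldl (pvAltStep l p n mat1 (max n 0)) (rows, z)
        = (rows ++ pvChunks l n mat1 z m ++ [List.replicate n.toNat 0],
            pvZEnd l n mat1 z m) := by
  intro m
  induction m with
  | zero =>
    intro z rows hm hz0 hzlen
    rw [show p - 1 - ((0:Nat):Int) = p - 1 by omega]
    rw [PySem.List.pyRange_one_cons (by omega), PySem.List.pyRange_one_eq_nil (show (p:Int) ≤ p - 1 + 1 by omega)]
    rw [List.foldl_cons, List.foldl_nil]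
    simp only [pvAltStep]
    have : (max n 0).toNat = n.toNat := by omega
    simp [pvChunks, pvZEnd, this]
  | succ m ih =>
    intro z rows hm hz0 hzlen
    rw [PySem.List.pyRange_one_cons (by push_cast at hm ⊢; omega)]
    rw [List.foldl_cons]
    set k : Int := max 0 (min l (min n ((mat1.length : Int) - z))) with hk
    have hk0 : 0 ≤ k := le_max_left _ _
    have hkle : z + k ≤ (mat1.length : Int) := by
      rw [hk]; omega
    have hKk : max 0 (min (l - 0) (min ((n.toNat : Nat) : Int) (mat1.length - z))) = k := by
      rw [hk]; omega
    have hcf := pv_chunkFzF l mat1 n.toNat 0 z hz0 hzlen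
    have hstep : pvAltStep l p n mat1 (max n 0) (rows, z) (p - 1 - ((m:Nat)+1:Nat))
        = (rows ++ [pvChunkF l mat1 0 z n.toNat], pvZF l mat1 0 z n.toNat) := by
      simp only [pvAltStep, ← hk]
      rw [if_neg (by push_cast at hm ⊢; omega)]
      rw [PySem.List.slice_toNat mat1 hz0 (by omega)]
      rw [hcf.1, hcf.2, hKk]
      have h1 : (z + k).toNat - z.toNat = k.toNat := by omega
      have h2 : (max n 0 - k).toNat = n.toNat - k.toNat := by
        push_cast at hk ⊢; omega
      rw [h1, h2]
    rw [hstep]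
    have := ih (pvZF l mat1 0 z n.toNat) (rows ++ [pvChunkF l mat1 0 z n.toNat])
      (by push_cast at hm ⊢; omega)
      (by rw [hcf.2, hKk]; omega) (by rw [hcf.2, hKk]; omega)
    rw [show (p:Int) - 1 - ((m:Nat)+1:Nat) + 1 = p - 1 - (m:Nat) by push_cast; omega]
    rw [this]
    simp [pvChunks, pvZEnd]

-- ===== VERDICT (by name: the statement is the Claim_ definition above) =====
theorem returnx_spec : Claim_equal_returnx := by
  intro l p n mat1 _
  unfold Spec_returnx returnx returnx_alt
  show ((PySem.List.pyRange 0 (p - 1) 1).foldl (pvOuterStep l n mat1 (mat1.length : Int))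
      ((PySem.List.pyRange 0 p 1).map (fun _ => (PySem.List.pyRange 0 n 1).map (fun _ => (0 : Int))), 0)).1
    = ((PySem.List.pyRange 0 p 1).foldl (pvAltStep l p n mat1 (max n 0)) ([], 0)).1
  by_cases hp : p ≤ 0
  · rw [PySem.List.pyRange_one_eq_nil (show (p:Int) - 1 ≤ 0 by omega),
        PySem.List.pyRange_one_eq_nil (show (p:Int) ≤ 0 by omega)]
    simp
  · have hx0 : (PySem.List.pyRange 0 p 1).map
        (fun _ => (PySem.List.pyRange 0 n 1).map (fun _ => (0 : Int)))
        = List.replicate p.toNat (List.replicate n.toNat 0) := by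
      rw [List.map_const', List.map_const']
      rw [PySem.List.length_pyRange_one, PySem.List.length_pyRange_one]
      rw [show ((p:Int) - 0) = p by ring, show ((n:Int) - 0) = n by ring]
    have hA := pv_outerA l p n mat1 (p - 1).toNat p.toNat 0 []
      (by simp; omega) (by omega)
    rw [show (p:Int) - 1 - ((p - 1).toNat : Int) = 0 by omega] at hA
    have hB := pv_outerB l p n mat1 (p - 1).toNat 0 []
      (by omega) (le_refl _) (by positivity)
    rw [show (p:Int) - 1 - ((p - 1).toNat : Int) = 0 by omega] at hB
    rw [hx0, show List.replicate p.toNat (List.replicate n.toNat (0:Int))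
        = [] ++ List.replicate p.toNat (List.replicate n.toNat 0) by simp]
    rw [hA, hB]
    rw [show p.toNat - (p - 1).toNat = 1 by omega]
    simp
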